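-- pv_equiv track=rewrite | github.com/FedXL/OEK | пожарные папки/main_2.py | analiz_mesto
-- ===== SOURCE A (Python) =====
-- def analiz_mesto (F):
--     d = []
--     for i in F:
--         a = i[0]+i[1]+i[2]
--         d.append(a)
--     dL,dM,dR = [], [], []
--     for i in d:
--         if i.find ("L") != -1:
--             c = i[0:2]
--             dL.append(c)
--         elif i.find ("M") != -1:
--             c = i[0:2]
--             dM.append(c)
--         elif i.find ("R") != -1:
--             c = i[0:2]
--             dR.append(c)
--     dL = sorted(dL)
--     dM = sorted(dM)
--     dR = sorted(dR)
--     return dL,dM,dR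
-- ===== SOURCE B (Python) =====
-- def analiz_mesto(F):
--     combined = [(s[0:2], s) for s in (i[0] + i[1] + i[2] for i in F)]
--     combined.sort(key=lambda p: p[0])  # one stable sort by prefix, instead of three bucket sorts
--     dL, dM, dR = [], [], []
--     for prefix, full in combined:
--         if full.find("L") != -1:
--             dL.append(prefix)
--         elif full.find("M") != -1:
--             dM.append(prefix)
--         elif full.find("R") != -1:
--             dR.append(prefix)
--     return dL, dM, dR
-- ===== Notes on version B (the rewrite author's own statement) =====
-- stated objective: alternative
-- what changed: B sorts once: it builds (prefix, fullstring) pairs, stably sorts them all by prefix, and then distributes prefixes into the three buckets in a single pass, so each bucket comes out already sorted instead of being sorted separately at the end.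
import Mathlib
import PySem

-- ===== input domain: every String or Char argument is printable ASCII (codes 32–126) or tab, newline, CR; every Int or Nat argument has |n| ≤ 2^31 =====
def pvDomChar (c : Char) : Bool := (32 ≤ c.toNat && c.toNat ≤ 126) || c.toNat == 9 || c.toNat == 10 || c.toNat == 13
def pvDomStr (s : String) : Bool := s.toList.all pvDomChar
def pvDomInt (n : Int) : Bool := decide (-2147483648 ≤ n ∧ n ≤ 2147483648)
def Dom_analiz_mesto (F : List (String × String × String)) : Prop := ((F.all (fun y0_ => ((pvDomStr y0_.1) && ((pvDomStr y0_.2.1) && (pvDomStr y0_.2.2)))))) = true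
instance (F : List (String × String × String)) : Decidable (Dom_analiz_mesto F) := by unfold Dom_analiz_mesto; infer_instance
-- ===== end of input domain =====

-- B changes the decomposition: one stable sort of (prefix, fullstring) pairs by prefix, then a single
-- distributing pass, instead of bucketing first and sorting each of the three buckets afterwards.

-- ===== PORT A =====
-- A: build d of the concatenations, bucket prefixes by the L/M/R find-chain, then sort each bucket.
-- applies the three trailing 'dX = sorted(dX)' reassignments of A to the bucket triple
def pvSort3 (z : List String × List String × List String) : List String × List String × List String :=
  (PySem.List.sorted z.1 (fun x => x) false,
   PySem.List.sorted z.2.1 (fun x => x) false,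
   PySem.List.sorted z.2.2 (fun x => x) false)

def analiz_mesto (F : List (String × String × String)) : List String × List String × List String :=
  pvSort3
    ((F.foldl (fun acc i => acc ++ [i.1.toList ++ i.2.1.toList ++ i.2.2.toList]) []).foldl
      (fun acc i =>
        if PySem.Chars.find i ['L'] ≠ -1 then
          (acc.1 ++ [String.mk (PySem.Chars.slice i (some 0) (some 2))], acc.2.1, acc.2.2)
        else if PySem.Chars.find i ['M'] ≠ -1 then
          (acc.1, acc.2.1 ++ [String.mk (PySem.Chars.slice i (some 0) (some 2))], acc.2.2)
        else if PySem.Chars.find i ['R'] ≠ -1 then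
          (acc.1, acc.2.1, acc.2.2 ++ [String.mk (PySem.Chars.slice i (some 0) (some 2))])
        else acc) ([], [], []))

-- ===== PORT B =====
-- B: (prefix, fullstring) pairs, one stable sort by prefix, then one distributing pass.
def analiz_mesto_alt (F : List (String × String × String)) : List String × List String × List String :=
  (PySem.List.sorted
      ((F.map (fun i => i.1.toList ++ i.2.1.toList ++ i.2.2.toList)).map
        (fun s => (String.mk (PySem.Chars.slice s (some 0) (some 2)), s)))
      (fun p => p.1) false).foldl
    (fun acc p =>
      if PySem.Chars.find p.2 ['L'] ≠ -1 then
        (acc.1 ++ [p.1], acc.2.1, acc.2.2)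
      else if PySem.Chars.find p.2 ['M'] ≠ -1 then
        (acc.1, acc.2.1 ++ [p.1], acc.2.2)
      else if PySem.Chars.find p.2 ['R'] ≠ -1 then
        (acc.1, acc.2.1, acc.2.2 ++ [p.1])
      else acc) ([], [], [])

-- ===== PRECONDITION & SPEC =====
def Spec_analiz_mesto (F : List (String × String × String)) (out : List String × List String × List String) : Prop := out = analiz_mesto_alt F
instance (F : List (String × String × String)) (out : List String × List String × List String) : Decidable (Spec_analiz_mesto F out) := by unfold Spec_analiz_mesto; infer_instance

-- ===== CLAIM (what is proved, stated in full; the proofs are below) =====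
def Claim_equal_analiz_mesto : Prop := ∀ (F : List (String × String × String)), Dom_analiz_mesto F → Spec_analiz_mesto F (analiz_mesto F)

-- ===== LEMMAS AND PROOFS =====

-- the three classification tests and the 2-char prefix
def pvQL (s : List Char) : Bool := decide (PySem.Chars.find s ['L'] ≠ -1)
def pvQM (s : List Char) : Bool := decide (PySem.Chars.find s ['M'] ≠ -1)
def pvQR (s : List Char) : Bool := decide (PySem.Chars.find s ['R'] ≠ -1)
def pvPref (s : List Char) : String := String.mk (PySem.Chars.slice s (some 0) (some 2))

-- the shared triple-accumulator loop shape of both ports, generic in element type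
theorem pv_tri_foldl {α : Type} (g : α → List Char) (f : α → String) (xs : List α)
    (l0 m0 r0 : List String) :
    xs.foldl (fun acc x =>
      if PySem.Chars.find (g x) ['L'] ≠ -1 then (acc.1 ++ [f x], acc.2.1, acc.2.2)
      else if PySem.Chars.find (g x) ['M'] ≠ -1 then (acc.1, acc.2.1 ++ [f x], acc.2.2)
      else if PySem.Chars.find (g x) ['R'] ≠ -1 then (acc.1, acc.2.1, acc.2.2 ++ [f x])
      else acc) (l0, m0, r0)
    = (l0 ++ (xs.filter (fun x => pvQL (g x))).map f,
       m0 ++ (xs.filter (fun x => !pvQL (g x) && pvQM (g x))).map f,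
       r0 ++ (xs.filter (fun x => !pvQL (g x) && !pvQM (g x) && pvQR (g x))).map f) := by
  induction xs generalizing l0 m0 r0 with
  | nil => simp
  | cons x t ih =>
    rw [List.foldl_cons]
    by_cases hL : PySem.Chars.find (g x) ['L'] ≠ -1
    · rw [if_pos hL, ih]
      simp [pvQL, pvQM, pvQR, List.filter_cons, hL]
    · rw [if_neg hL]
      rw [not_not] at hL
      by_cases hM : PySem.Chars.find (g x) ['M'] ≠ -1
      · rw [if_pos hM, ih]
        simp [pvQL, pvQM, pvQR, List.filter_cons, hL, hM]
      · rw [if_neg hM]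
        rw [not_not] at hM
        by_cases hR : PySem.Chars.find (g x) ['R'] ≠ -1
        · rw [if_pos hR, ih]
          simp [pvQL, pvQM, pvQR, List.filter_cons, hL, hM, hR]
        · rw [if_neg hR, ih]
          rw [not_not] at hR
          simp [pvQL, pvQM, pvQR, List.filter_cons, hL, hM, hR]

-- A's loop, with the literal lambda of the port (so that rw matches)
theorem pv_tri_foldl_A (xs : List (List Char)) :
    xs.foldl (fun acc i =>
        if PySem.Chars.find i ['L'] ≠ -1 then
          (acc.1 ++ [String.mk (PySem.Chars.slice i (some 0) (some 2))], acc.2.1, acc.2.2)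
        else if PySem.Chars.find i ['M'] ≠ -1 then
          (acc.1, acc.2.1 ++ [String.mk (PySem.Chars.slice i (some 0) (some 2))], acc.2.2)
        else if PySem.Chars.find i ['R'] ≠ -1 then
          (acc.1, acc.2.1, acc.2.2 ++ [String.mk (PySem.Chars.slice i (some 0) (some 2))])
        else acc) ([], [], [])
    = ((xs.filter (fun s => pvQL s)).map pvPref,
       (xs.filter (fun s => !pvQL s && pvQM s)).map pvPref,
       (xs.filter (fun s => !pvQL s && !pvQM s && pvQR s)).map pvPref) := by
  have h := pv_tri_foldl (fun s => s) pvPref xs [] [] []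
  simpa using h

-- B's loop, with the literal lambda of the port
theorem pv_tri_foldl_B (xs : List (String × List Char)) :
    xs.foldl (fun acc p =>
        if PySem.Chars.find p.2 ['L'] ≠ -1 then (acc.1 ++ [p.1], acc.2.1, acc.2.2)
        else if PySem.Chars.find p.2 ['M'] ≠ -1 then (acc.1, acc.2.1 ++ [p.1], acc.2.2)
        else if PySem.Chars.find p.2 ['R'] ≠ -1 then (acc.1, acc.2.1, acc.2.2 ++ [p.1])
        else acc) ([], [], [])
    = ((xs.filter (fun p => pvQL p.2)).map Prod.fst,
       (xs.filter (fun p => !pvQL p.2 && pvQM p.2)).map Prod.fst,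
       (xs.filter (fun p => !pvQL p.2 && !pvQM p.2 && pvQR p.2)).map Prod.fst) := by
  have h := pv_tri_foldl (fun p : String × List Char => p.2) Prod.fst xs [] [] []
  simpa using h

-- sorted-then-filter-then-project equals sort of the projected filtered bucket
theorem pv_bucket (ds : List (List Char)) (q : List Char → Bool) :
    PySem.List.sorted ((ds.filter q).map pvPref) (fun x => x) false
    = (((PySem.List.sorted (ds.map (fun s => (pvPref s, s))) (fun p => p.1) false).filter
        (fun p => q p.2)).map Prod.fst) := by
  apply PySem.List.sorted_id_eq_of_perm_of_pairwise
  · have hperm : (PySem.List.sorted (ds.map (fun s => (pvPref s, s))) (fun p => p.1) false).Perm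
        (ds.map (fun s => (pvPref s, s))) := PySem.List.sorted_perm _ _ _
    have h1 := (hperm.filter (fun p => q p.2)).map Prod.fst
    refine h1.trans ?_
    rw [show (ds.map (fun s => (pvPref s, s))).filter (fun p => q p.2)
        = (ds.filter q).map (fun s => (pvPref s, s)) by
      rw [List.filter_map]; rfl]
    rw [List.map_map]
    exact List.Perm.refl _
  · have h := PySem.List.sorted_pairwise (ds.map (fun s => (pvPref s, s))) (fun p => p.1)
    have h2 : List.Pairwise (fun a b => a.1 ≤ b.1)
        ((PySem.List.sorted (ds.map (fun s => (pvPref s, s))) (fun p => p.1) false).filter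
          (fun p => q p.2)) :=
      List.Pairwise.sublist (List.filter_sublist) h
    exact List.pairwise_map.mpr h2

theorem analiz_mesto_eq_alt (F : List (String × String × String)) :
    analiz_mesto F = analiz_mesto_alt F := by
  unfold analiz_mesto analiz_mesto_alt
  rw [PySem.List.foldl_append_singleton_eq_map]
  rw [pv_tri_foldl_A, pv_tri_foldl_B]
  refine Prod.ext ?_ (Prod.ext ?_ ?_)
  · exact pv_bucket _ (fun s => pvQL s)
  · exact pv_bucket _ (fun s => !pvQL s && pvQM s)
  · exact pv_bucket _ (fun s => !pvQL s && !pvQM s && pvQR s)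

-- ===== VERDICT (by name: the statement is the Claim_ definition above) =====
theorem analiz_mesto_spec : Claim_equal_analiz_mesto := by
  intro F _
  exact analiz_mesto_eq_alt F
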